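-- pv_equiv track=rewrite | github.com/viniciuslsoares/MC358 | t4.py | PD_dados
-- ===== SOURCE A (Python) =====
-- def PD_dados(dados, proc):
--     matriz = [[9] * len(dados) for _ in range(len(dados))]
--     d = len(dados)
--     # caso base:
--     # não fazemos reboot no último dia
--     for line in range(d):
--         matriz[line][d-1] = min(dados[d-1], proc[line])
--
--     for col in range(d-2, -1, -1):      # não passa pela última coluna
--         for line in range(d):
--             if line > col:
--                 matriz[line][col] = 0
--             else:
--                 reboot = matriz[0][col+1]
--                 n_reboot = min(dados[col], proc[line]) + matriz[line+1][col+1]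
--                 matriz[line][col] = max(reboot, n_reboot)
--     return matriz[0][0], matriz
-- ===== SOURCE B (Python) =====
-- def PD_dados(dados, proc):
--     # Top-down memoized recursion: each cell's value is demanded via f(line, col)
--     # and cached in a dict; the matrix is then assembled from the cache-backed f.
--     d = len(dados)
--     memo = {}
--
--     def f(line, col):
--         key = (line, col)
--         if key in memo:
--             return memo[key]
--         if col + 1 < d:
--             if line > col:
--                 v = 0
--             else:
--                 v = max(f(0, col + 1), min(dados[col], proc[line]) + f(line + 1, col + 1))
--         else:
--             v = min(dados[d - 1], proc[line])
--         memo[key] = v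
--         return v
--
--     matriz = [[f(line, col) for col in range(d)] for line in range(d)]
--     return matriz[0][0], matriz
-- ===== Notes on version B (the rewrite author's own statement) =====
-- stated objective: alternative
-- what changed: Replaces A's bottom-up in-place fill of a preallocated d x d matrix (nested index loops, right-to-left columns) with a top-down memoized recursive helper f(line, col) caching each cell in a dict; the matrix is assembled by demanding every cell from f.
import Mathlib
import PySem

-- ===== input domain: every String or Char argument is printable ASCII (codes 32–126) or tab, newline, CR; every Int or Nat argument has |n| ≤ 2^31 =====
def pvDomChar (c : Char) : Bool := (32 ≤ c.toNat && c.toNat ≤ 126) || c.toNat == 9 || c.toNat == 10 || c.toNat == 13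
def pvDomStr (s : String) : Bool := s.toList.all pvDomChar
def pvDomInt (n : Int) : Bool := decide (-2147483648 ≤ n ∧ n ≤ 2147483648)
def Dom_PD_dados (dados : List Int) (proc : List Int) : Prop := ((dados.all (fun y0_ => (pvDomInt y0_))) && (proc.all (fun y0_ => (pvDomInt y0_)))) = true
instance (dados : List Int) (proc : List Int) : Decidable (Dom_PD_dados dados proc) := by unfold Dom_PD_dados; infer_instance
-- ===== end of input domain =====

-- B replaces A's bottom-up in-place matrix fill by a top-down memoized recursion
-- (demand-driven, dict cache); objective: alternative decomposition, same values.

-- ===== PORT A =====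
-- matriz[i][j] = x
def pvSetCell (m : List (List Int)) (i j : Nat) (x : Int) : List (List Int) :=
  m.modify i (fun row => row.set j x)

-- matriz after the base-case loop (last column set on every line)
def pvBaseM (dados proc : List Int) : List (List Int) :=
  (List.range dados.length).foldl (fun m line =>
      pvSetCell m line (dados.length-1) (min (dados.getD (dados.length-1) 0) (proc.getD line 0)))
    (List.replicate dados.length (List.replicate dados.length 9))

-- body of `for line in range(d)` at a fixed col (reboot / n_reboot inlined)
def pvInnerStep (dados proc : List Int) (col : Nat) (m : List (List Int)) : List (List Int) :=
  (List.range dados.length).foldl (fun m line =>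
    if line > col then pvSetCell m line col 0
    else pvSetCell m line col
      (max ((m.getD 0 []).getD (col+1) 0)
           (min (dados.getD col 0) (proc.getD line 0) + (m.getD (line+1) []).getD (col+1) 0))) m

-- matriz after `for col in range(d-2, -1, -1)` (= [d-2, …, 0])
def pvM2 (dados proc : List Int) : List (List Int) :=
  ((List.range (dados.length-1)).reverse).foldl (fun m col => pvInnerStep dados proc col m)
    (pvBaseM dados proc)

def PD_dados (dados : List Int) (proc : List Int) : Int × List (List Int) :=
  (((pvM2 dados proc).getD 0 []).getD 0 0, pvM2 dados proc)

-- ===== PORT B =====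
-- Source B's memoized f(line, col): returns the value and the updated memo dict.
-- (Source B tests `col + 1 < d` first; the branches are transcribed in that order.)
def pvMemF (dados proc : List Int) (line col : Nat)
    (memo : PySem.Dict (Nat × Nat) Int) : Int × PySem.Dict (Nat × Nat) Int :=
  match memo.get? (line, col) with
  | some v => (v, memo)
  | none =>
    if h : col + 1 < dados.length then
      if line > col then (0, memo.insert (line, col) 0)
      else
        let r := pvMemF dados proc 0 (col+1) memo
        let s := pvMemF dados proc (line+1) (col+1) r.2
        let v := max r.1 (min (dados.getD col 0) (proc.getD line 0) + s.1)
        (v, s.2.insert (line, col) v)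
    else
      let v := min (dados.getD (dados.length - 1) 0) (proc.getD line 0)
      (v, memo.insert (line, col) v)
termination_by dados.length - col
decreasing_by all_goals omega

-- matriz = [[f(line, col) for col in range(d)] for line in range(d)], memo threaded
def pvRowsB (dados proc : List Int) : List (List Int) × PySem.Dict (Nat × Nat) Int :=
  (List.range dados.length).foldl (fun acc line =>
    let rc := (List.range dados.length).foldl
      (fun (rc : List Int × PySem.Dict (Nat × Nat) Int) col =>
        let vm := pvMemF dados proc line col rc.2
        (rc.1 ++ [vm.1], vm.2)) ([], acc.2)
    (acc.1 ++ [rc.1], rc.2)) ([], PySem.Dict.empty)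

def PD_dados_alt (dados : List Int) (proc : List Int) : Int × List (List Int) :=
  (((pvRowsB dados proc).1.getD 0 []).getD 0 0, (pvRowsB dados proc).1)

-- ===== PRECONDITION & SPEC =====
-- Pre_ excludes exactly the inputs where the Python A raises IndexError:
-- empty dados (matriz[0][0]) and proc shorter than dados (proc[line]).
def Pre_PD_dados (dados : List Int) (proc : List Int) : Prop :=
  dados ≠ [] ∧ dados.length ≤ proc.length
instance (dados : List Int) (proc : List Int) : Decidable (Pre_PD_dados dados proc) := by
  unfold Pre_PD_dados; infer_instance
def pvWitness_PD_dados : List Int × List Int := ([3, 1, 4], [2, 5, 1])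

def Spec_PD_dados (dados : List Int) (proc : List Int) (out : Int × List (List Int)) : Prop := out = PD_dados_alt dados proc
instance (dados : List Int) (proc : List Int) (out : Int × List (List Int)) : Decidable (Spec_PD_dados dados proc out) := by unfold Spec_PD_dados; infer_instance

-- ===== CLAIM (what is proved, stated in full; the proofs are below) =====
def Claim_equal_PD_dados : Prop := ∀ (dados : List Int) (proc : List Int), Dom_PD_dados dados proc → Pre_PD_dados dados proc → Spec_PD_dados dados proc (PD_dados dados proc)

-- ===== LEMMAS AND PROOFS =====

-- the common recurrence: pvV line col is the value both programs put at matriz[line][col]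
def pvV (dados proc : List Int) (line col : Nat) : Int :=
  if h : col + 1 < dados.length then
    if line > col then 0
    else max (pvV dados proc 0 (col+1))
             (min (dados.getD col 0) (proc.getD line 0) + pvV dados proc (line+1) (col+1))
  else min (dados.getD (dados.length - 1) 0) (proc.getD line 0)
termination_by dados.length - col
decreasing_by all_goals omega

def pvMspec (dados proc : List Int) : List (List Int) :=
  (List.range dados.length).map (fun line =>
    (List.range dados.length).map (fun col => pvV dados proc line col))

-- ---- B side ----

-- every cached value is the recurrence's value
def pvValid (dados proc : List Int) (memo : PySem.Dict (Nat × Nat) Int) : Prop :=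
  ∀ l c v, memo.get? (l, c) = some v → v = pvV dados proc l c

theorem valid_insert {dados proc : List Int} {memo : PySem.Dict (Nat × Nat) Int} {x : Int}
    (hm : pvValid dados proc memo) (l c : Nat)
    (hv : pvV dados proc l c = x) :
    pvValid dados proc (memo.insert (l, c) x) := by
  intro l' c' v hget
  rw [PySem.Dict.get?_insert] at hget
  by_cases he : (l', c') = (l, c)
  · rw [if_pos he] at hget
    injection he with h1 h2
    subst h1; subst h2
    exact (Option.some.inj hget).symm.trans hv.symm
  · rw [if_neg he] at hget
    exact hm l' c' v hget

theorem memF_spec (dados proc : List Int) :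
    ∀ k line col memo, dados.length - col ≤ k → pvValid dados proc memo →
      (pvMemF dados proc line col memo).1 = pvV dados proc line col ∧
      pvValid dados proc (pvMemF dados proc line col memo).2 := by
  intro k
  induction k with
  | zero =>
    intro line col memo hk hm
    have hlt : ¬ (col + 1 < dados.length) := by omega
    rw [pvMemF]
    cases hget : memo.get? (line, col) with
    | some v =>
      dsimp only
      exact ⟨hm line col v hget, hm⟩
    | none =>
      simp only [dif_neg hlt]
      refine ⟨?_, valid_insert hm line col ?_⟩
      · rw [pvV, dif_neg hlt]
      · rw [pvV, dif_neg hlt]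
  | succ k ih =>
    intro line col memo hk hm
    rw [pvMemF]
    cases hget : memo.get? (line, col) with
    | some v =>
      dsimp only
      exact ⟨hm line col v hget, hm⟩
    | none =>
      by_cases hlt : col + 1 < dados.length
      · simp only [dif_pos hlt]
        by_cases hlc : line > col
        · simp only [if_pos hlc]
          refine ⟨?_, valid_insert hm line col ?_⟩
          · rw [pvV, dif_pos hlt, if_pos hlc]
          · rw [pvV, dif_pos hlt, if_pos hlc]
        · simp only [if_neg hlc]
          obtain ⟨hr1, hr2⟩ := ih 0 (col+1) memo (by omega) hm
          obtain ⟨hs1, hs2⟩ :=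
            ih (line+1) (col+1) (pvMemF dados proc 0 (col+1) memo).2 (by omega) hr2
          refine ⟨?_, valid_insert hs2 line col ?_⟩
          · rw [hr1, hs1]
            conv_rhs => rw [pvV]
            rw [dif_pos hlt, if_neg hlc]
          · rw [hr1, hs1]
            conv_lhs => rw [pvV]
            rw [dif_pos hlt, if_neg hlc]
      · simp only [dif_neg hlt]
        refine ⟨?_, valid_insert hm line col ?_⟩
        · rw [pvV, dif_neg hlt]
        · rw [pvV, dif_neg hlt]

theorem row_fold (dados proc : List Int) (line : Nat) :
    ∀ n (memo : PySem.Dict (Nat × Nat) Int), pvValid dados proc memo →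
      ((List.range n).foldl
        (fun (rc : List Int × PySem.Dict (Nat × Nat) Int) col =>
          let vm := pvMemF dados proc line col rc.2
          (rc.1 ++ [vm.1], vm.2)) ([], memo)).1
        = (List.range n).map (fun col => pvV dados proc line col) ∧
      pvValid dados proc ((List.range n).foldl
        (fun (rc : List Int × PySem.Dict (Nat × Nat) Int) col =>
          let vm := pvMemF dados proc line col rc.2
          (rc.1 ++ [vm.1], vm.2)) ([], memo)).2 := by
  intro n
  induction n with
  | zero => intro memo hm; exact ⟨rfl, hm⟩
  | succ n ih =>
    intro memo hm
    obtain ⟨ih1, ih2⟩ := ih memo hm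
    rw [List.range_succ, List.foldl_append, List.foldl_cons, List.foldl_nil,
        List.map_append]
    obtain ⟨hv, hvm⟩ := memF_spec dados proc (dados.length - n) line n _ (le_refl _) ih2
    exact ⟨by simp only [ih1, hv, List.map_cons, List.map_nil], hvm⟩

theorem b_matrix (dados proc : List Int) :
    (pvRowsB dados proc).1 = pvMspec dados proc := by
  unfold pvRowsB pvMspec
  suffices h : ∀ n (memo : PySem.Dict (Nat × Nat) Int) (acc : List (List Int)),
      pvValid dados proc memo →
      ((List.range n).foldl (fun acc line =>
        let rc := (List.range dados.length).foldl
          (fun (rc : List Int × PySem.Dict (Nat × Nat) Int) col =>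
            let vm := pvMemF dados proc line col rc.2
            (rc.1 ++ [vm.1], vm.2)) ([], acc.2)
        (acc.1 ++ [rc.1], rc.2)) (acc, memo)).1
      = acc ++ (List.range n).map (fun line =>
          (List.range dados.length).map (fun col => pvV dados proc line col)) ∧
      pvValid dados proc ((List.range n).foldl (fun acc line =>
        let rc := (List.range dados.length).foldl
          (fun (rc : List Int × PySem.Dict (Nat × Nat) Int) col =>
            let vm := pvMemF dados proc line col rc.2
            (rc.1 ++ [vm.1], vm.2)) ([], acc.2)
        (acc.1 ++ [rc.1], rc.2)) (acc, memo)).2 by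
    have h0 := (h dados.length PySem.Dict.empty []
      (fun l c v hv => by simp [PySem.Dict.get?_empty] at hv)).1
    simpa using h0
  intro n
  induction n with
  | zero => intro memo acc hm; exact ⟨by simp, hm⟩
  | succ n ih =>
    intro memo acc hm
    obtain ⟨ih1, ih2⟩ := ih memo acc hm
    rw [List.range_succ, List.foldl_append, List.foldl_cons, List.foldl_nil,
        List.map_append]
    obtain ⟨hr, hrm⟩ := row_fold dados proc n dados.length _ ih2
    refine ⟨?_, hrm⟩
    simp only [ih1, hr, List.map_cons, List.map_nil, List.append_assoc]

-- ---- A side ----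

def pvEntry (m : List (List Int)) (i j : Nat) : Int := (m.getD i []).getD j 0

theorem getD_setCell (m : List (List Int)) (i j a : Nat) (x : Int) :
    (pvSetCell m i j x).getD a [] = if a = i then (m.getD a []).set j x else m.getD a [] := by
  unfold pvSetCell
  by_cases h : a = i
  · subst h
    rw [if_pos rfl, List.getD_eq_getElem?_getD, List.getD_eq_getElem?_getD, List.getElem?_modify]
    cases hma : m[a]? with
    | none => simp [hma]
    | some r => simp [hma]
  · rw [if_neg h, List.getD_eq_getElem?_getD, List.getD_eq_getElem?_getD, List.getElem?_modify]
    cases hma : m[a]? with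
    | none => simp [hma]
    | some r => simp [hma, show ¬ i = a from fun hh => h hh.symm]

theorem length_setCell (m : List (List Int)) (i j : Nat) (x : Int) :
    (pvSetCell m i j x).length = m.length := by
  unfold pvSetCell; exact List.length_modify ..

theorem getD_set_int (row : List Int) (j b : Nat) (x : Int) :
    ((row.set j x).getD b 0) = if b = j ∧ j < row.length then x else row.getD b 0 := by
  rw [List.getD_eq_getElem?_getD, List.getElem?_set]
  by_cases hbj : j = b
  · subst hbj
    by_cases hl : j < row.length
    · rw [if_pos rfl, if_pos hl, if_pos ⟨rfl, hl⟩]; rfl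
    · rw [if_pos rfl, if_neg hl, if_neg (by omega), List.getD_eq_default _ _ (by omega)]; rfl
  · rw [if_neg hbj, if_neg (by omega), List.getD_eq_getElem?_getD]

theorem entry_setCell (m : List (List Int)) (i j a b : Nat) (x : Int)
    (hrow : j < (m.getD i []).length) :
    pvEntry (pvSetCell m i j x) a b = if a = i ∧ b = j then x else pvEntry m a b := by
  unfold pvEntry
  rw [getD_setCell]
  by_cases ha : a = i
  · subst ha
    rw [if_pos rfl, getD_set_int]
    by_cases hb : b = j
    · rw [if_pos ⟨hb, hrow⟩, if_pos ⟨rfl, hb⟩]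
    · rw [if_neg (by omega), if_neg (by omega)]
  · rw [if_neg ha, if_neg (by omega)]

theorem length_row_setCell (m : List (List Int)) (i j a : Nat) (x : Int) :
    ((pvSetCell m i j x).getD a []).length = (m.getD a []).length := by
  rw [getD_setCell]
  split_ifs with h
  · subst h; simp
  · rfl

-- shape invariant: d rows of length d
def pvShape (d : Nat) (m : List (List Int)) : Prop :=
  m.length = d ∧ ∀ i, i < d → (m.getD i []).length = d

theorem shape_setCell {d : Nat} {m : List (List Int)} (h : pvShape d m) (i j : Nat) (x : Int) :
    pvShape d (pvSetCell m i j x) :=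
  ⟨by rw [length_setCell]; exact h.1, fun a ha => by rw [length_row_setCell]; exact h.2 a ha⟩

theorem base_loop (dados proc : List Int) :
    ∀ n, n ≤ dados.length →
    pvShape dados.length ((List.range n).foldl (fun m line =>
        pvSetCell m line (dados.length-1) (min (dados.getD (dados.length-1) 0) (proc.getD line 0)))
        (List.replicate dados.length (List.replicate dados.length 9)))
    ∧ ∀ i j, i < dados.length → j < dados.length →
      pvEntry ((List.range n).foldl (fun m line =>
        pvSetCell m line (dados.length-1) (min (dados.getD (dados.length-1) 0) (proc.getD line 0)))
        (List.replicate dados.length (List.replicate dados.length 9))) i j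
      = if j = dados.length - 1 ∧ i < n then min (dados.getD (dados.length-1) 0) (proc.getD i 0) else 9 := by
  intro n
  induction n with
  | zero =>
    intro _
    simp only [List.range_zero, List.foldl_nil]
    constructor
    · refine ⟨by simp, fun i hi => ?_⟩
      simp [List.getD_eq_getElem?_getD, List.getElem?_replicate, hi]
    · intro i j hi hj
      rw [if_neg (show ¬(j = dados.length - 1 ∧ i < 0) by omega)]
      unfold pvEntry
      simp [List.getD_eq_getElem?_getD, List.getElem?_replicate, hi, hj]
  | succ n ih =>
    intro hn
    obtain ⟨ihs, ihe⟩ := ih (by omega)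
    rw [List.range_succ, List.foldl_append, List.foldl_cons, List.foldl_nil]
    refine ⟨shape_setCell ihs _ _ _, fun i j hi hj => ?_⟩
    rw [entry_setCell _ _ _ _ _ _ (by rw [ihs.2 n (by omega)]; omega), ihe i j hi hj]
    by_cases hcase : i = n ∧ j = dados.length - 1
    · rw [if_pos hcase, if_pos (show j = dados.length - 1 ∧ i < n + 1 from ⟨hcase.2, by omega⟩),
          hcase.1]
    · rw [if_neg hcase]
      by_cases h1 : j = dados.length - 1 ∧ i < n
      · rw [if_pos h1, if_pos (show j = dados.length - 1 ∧ i < n + 1 from ⟨h1.1, by omega⟩)]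
      · rw [if_neg h1, if_neg (show ¬(j = dados.length - 1 ∧ i < n + 1) by omega)]

-- full column invariant
def pvInvA (dados proc : List Int) (m : List (List Int)) (c : Nat) : Prop :=
  pvShape dados.length m ∧
  ∀ i j, i < dados.length → j < dados.length →
    pvEntry m i j = if c ≤ j then pvV dados proc i j else 9

theorem inner_loop (dados proc : List Int) (c : Nat) (hc : c + 1 < dados.length)
    (m : List (List Int)) (hm : pvInvA dados proc m (c+1)) :
    pvInvA dados proc (pvInnerStep dados proc c m) c := by
  unfold pvInnerStep
  suffices h : ∀ n, n ≤ dados.length →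
      pvShape dados.length ((List.range n).foldl (fun m line =>
        if line > c then pvSetCell m line c 0
        else pvSetCell m line c
          (max ((m.getD 0 []).getD (c+1) 0)
               (min (dados.getD c 0) (proc.getD line 0) + (m.getD (line+1) []).getD (c+1) 0))) m)
      ∧ ∀ i j, i < dados.length → j < dados.length →
        pvEntry ((List.range n).foldl (fun m line =>
          if line > c then pvSetCell m line c 0
          else pvSetCell m line c
            (max ((m.getD 0 []).getD (c+1) 0)
                 (min (dados.getD c 0) (proc.getD line 0) + (m.getD (line+1) []).getD (c+1) 0))) m) i j
        = if j = c ∧ i < n then pvV dados proc i j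
          else if c + 1 ≤ j then pvV dados proc i j else 9 by
    obtain ⟨hs, he⟩ := h dados.length (le_refl _)
    refine ⟨hs, fun i j hi hj => ?_⟩
    rw [he i j hi hj]
    by_cases h1 : j = c
    · rw [if_pos ⟨h1, hi⟩, if_pos (show c ≤ j by omega)]
    · rw [if_neg (show ¬(j = c ∧ i < dados.length) by omega)]
      by_cases h2 : c + 1 ≤ j
      · rw [if_pos h2, if_pos (show c ≤ j by omega)]
      · rw [if_neg h2, if_neg (show ¬(c ≤ j) by omega)]
  intro n
  induction n with
  | zero =>
    intro _
    simp only [List.range_zero, List.foldl_nil]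
    refine ⟨hm.1, fun i j hi hj => ?_⟩
    rw [hm.2 i j hi hj, if_neg (show ¬(j = c ∧ i < 0) by omega)]
  | succ n ih =>
    intro hn
    obtain ⟨ihs, ihe⟩ := ih (by omega)
    rw [List.range_succ, List.foldl_append, List.foldl_cons, List.foldl_nil]
    set acc := (List.range n).foldl (fun m line =>
          if line > c then pvSetCell m line c 0
          else pvSetCell m line c
            (max ((m.getD 0 []).getD (c+1) 0)
                 (min (dados.getD c 0) (proc.getD line 0) + (m.getD (line+1) []).getD (c+1) 0))) m
      with hacc
    by_cases hlc : n > c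
    · rw [if_pos hlc]
      refine ⟨shape_setCell ihs _ _ _, fun i j hi hj => ?_⟩
      rw [entry_setCell _ _ _ _ _ _ (by rw [ihs.2 n (by omega)]; omega), ihe i j hi hj]
      by_cases hcase : i = n ∧ j = c
      · rw [if_pos hcase, if_pos (show j = c ∧ i < n + 1 from ⟨hcase.2, by omega⟩),
            hcase.1, hcase.2]
        conv_rhs => rw [pvV]
        rw [dif_pos hc, if_pos hlc]
      · rw [if_neg hcase]
        by_cases h1 : j = c ∧ i < n
        · rw [if_pos h1, if_pos (show j = c ∧ i < n + 1 from ⟨h1.1, by omega⟩)]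
        · rw [if_neg h1, if_neg (show ¬(j = c ∧ i < n + 1) by omega)]
    · rw [if_neg hlc]
      have hread0 : (acc.getD 0 []).getD (c+1) 0 = pvV dados proc 0 (c+1) := by
        have h0 := ihe 0 (c+1) (by omega) (by omega)
        unfold pvEntry at h0
        rw [h0, if_neg (by omega), if_pos (le_refl _)]
      have hread1 : (acc.getD (n+1) []).getD (c+1) 0 = pvV dados proc (n+1) (c+1) := by
        have h0 := ihe (n+1) (c+1) (by omega) (by omega)
        unfold pvEntry at h0
        rw [h0, if_neg (by omega), if_pos (le_refl _)]
      rw [hread0, hread1]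
      refine ⟨shape_setCell ihs _ _ _, fun i j hi hj => ?_⟩
      rw [entry_setCell _ _ _ _ _ _ (by rw [ihs.2 n (by omega)]; omega), ihe i j hi hj]
      by_cases hcase : i = n ∧ j = c
      · rw [if_pos hcase, if_pos (show j = c ∧ i < n + 1 from ⟨hcase.2, by omega⟩),
            hcase.1, hcase.2]
        conv_rhs => rw [pvV]
        rw [dif_pos hc, if_neg hlc]
      · rw [if_neg hcase]
        by_cases h1 : j = c ∧ i < n
        · rw [if_pos h1, if_pos (show j = c ∧ i < n + 1 from ⟨h1.1, by omega⟩)]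
        · rw [if_neg h1, if_neg (show ¬(j = c ∧ i < n + 1) by omega)]

theorem outer_loop (dados proc : List Int) :
    ∀ k, k ≤ dados.length - 1 → ∀ m, pvInvA dados proc m k →
    pvInvA dados proc
      (((List.range k).reverse).foldl (fun m col => pvInnerStep dados proc col m) m) 0 := by
  intro k
  induction k with
  | zero => intro _ m hm; exact hm
  | succ k ih =>
    intro hk m hm
    rw [List.range_succ, List.reverse_append, List.reverse_singleton, List.singleton_append,
        List.foldl_cons]
    exact ih (by omega) _ (inner_loop dados proc k (by omega) m hm)

theorem a_matrix (dados proc : List Int) (hd : dados ≠ []) :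
    pvM2 dados proc = pvMspec dados proc := by
  have hdl : 1 ≤ dados.length := by
    cases dados with | nil => simp at hd | cons a l => simp
  have hbase := base_loop dados proc dados.length (le_refl _)
  have hm1 : pvInvA dados proc (pvBaseM dados proc) (dados.length - 1) := by
    unfold pvBaseM
    refine ⟨hbase.1, fun i j hi hj => ?_⟩
    rw [hbase.2 i j hi hj]
    by_cases h1 : j = dados.length - 1
    · rw [if_pos ⟨h1, hi⟩, if_pos (by omega), h1]
      rw [pvV, dif_neg (by omega)]
    · rw [if_neg (show ¬(j = dados.length - 1 ∧ i < dados.length) by omega),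
          if_neg (show ¬(dados.length - 1 ≤ j) by omega)]
  have hfinal : pvInvA dados proc (pvM2 dados proc) 0 := by
    unfold pvM2
    exact outer_loop dados proc (dados.length - 1) (le_refl _) _ hm1
  apply List.ext_getElem
  · rw [hfinal.1.1]; unfold pvMspec; simp
  · intro i h1 h2
    have hi : i < dados.length := by rw [hfinal.1.1] at h1; exact h1
    have hrl := hfinal.1.2 i hi
    rw [List.getD_eq_getElem _ _ h1] at hrl
    apply List.ext_getElem
    · rw [hrl]; unfold pvMspec; simp [hi]
    · intro j hj1 hj2
      have hjd : j < dados.length := by rw [hrl] at hj1; exact hj1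
      have he := hfinal.2 i j hi hjd
      unfold pvEntry at he
      rw [List.getD_eq_getElem _ _ h1, List.getD_eq_getElem _ _ hj1, if_pos (Nat.zero_le j)] at he
      rw [he]
      unfold pvMspec
      simp [hi, hjd]

-- ===== VERDICT (by name: the statement is the Claim_ definition above) =====
theorem PD_dados_spec : Claim_equal_PD_dados := by
  intro dados proc _ hpre
  unfold Spec_PD_dados PD_dados PD_dados_alt
  rw [a_matrix dados proc hpre.1, b_matrix dados proc]
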